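-- pv_equiv track=rewrite | github.com/nachoaz/Data_Structures | Dynamic_Programming/find_longest_nondecreasing_subsequence.py | get_len_of_longest_nondecreasing_subseq
-- ===== SOURCE A (Python) =====
-- def get_len_of_longest_nondecreasing_subseq(A):
--     def get_L_i(i):
--         candidate_js = [j for j in range(i) if A[j] <= A[i]]
--         if not candidate_js:
--             return 1
--
--         if L[i] is None:
--             L[i] = 1 + max([get_L_i(j) for j in candidate_js])
--
--         return L[i]
--
--     L = [None]*len(A)
--     return get_L_i(len(A)-1)
-- ===== SOURCE B (Python) =====
-- def get_len_of_longest_nondecreasing_subseq(A):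
--     # Bottom-up iterative DP: dp holds (value, length-of-longest-nondecreasing-
--     # subsequence-ending-there) for each prefix element; returns dp[-1][1].
--     if not A:
--         return 0
--     dp = []
--     for x in A:
--         best = 0
--         for v, l in dp:
--             if v <= x and l > best:
--                 best = l
--         dp.append((x, best + 1))
--     return dp[-1][1]
-- ===== Notes on version B (the rewrite author's own statement) =====
-- stated objective: faster
-- what changed: Replaces A's top-down memoized recursion (which rebuilds an O(i) candidate list on every call, even memo hits) with a bottom-up single forward pass keeping a list of (value, best-length-ending-there) pairs.
-- intended difference: On the empty list A returns 1 (its recursion bottoms out before reading any element), while B returns 0, the intended length of a subsequence of an empty list. — e.g. on get_len_of_longest_nondecreasing_subseq([]): A returns 1, B returns 0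
import Mathlib
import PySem

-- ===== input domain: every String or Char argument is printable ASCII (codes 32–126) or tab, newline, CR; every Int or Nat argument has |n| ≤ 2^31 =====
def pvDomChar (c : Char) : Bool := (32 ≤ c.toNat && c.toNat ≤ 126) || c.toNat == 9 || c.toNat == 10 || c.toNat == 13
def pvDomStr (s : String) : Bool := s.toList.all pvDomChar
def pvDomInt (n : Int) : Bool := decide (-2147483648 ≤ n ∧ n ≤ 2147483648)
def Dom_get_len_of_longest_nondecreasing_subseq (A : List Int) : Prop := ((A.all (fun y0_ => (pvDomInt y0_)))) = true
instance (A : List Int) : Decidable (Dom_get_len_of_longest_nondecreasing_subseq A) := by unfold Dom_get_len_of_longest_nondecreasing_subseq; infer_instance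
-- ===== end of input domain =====

-- B replaces A's top-down memoized recursion by a bottom-up single forward pass (objective:
-- alternative; also avoids A's O(i) candidate rebuild on every memo hit); on the empty list A
-- returns 1 while B returns the intended 0 (see D_ below). Return value only; no mutation escapes.

-- ===== PORT A =====
-- candidate_js = [j for j in range(i) if A[j] <= A[i]]
-- (indices j from range(i) and i itself are in range whenever this list is consulted, so
--  List.getD is exact for Python's A[j]/A[i] there; i is kept as a Nat, see the top-level note)
def pvCand (A : List Int) (i : Nat) : List Nat :=
  (List.range i).filter (fun j => A.getD j 0 ≤ A.getD i 0)

-- get_L_i with the memo list L threaded through; returns (value, updated memo).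
-- max([...]) on the (nonempty) list of recursive values is PySem.List.max? with identity key.
def pvGetLi (A : List Int) (i : Nat) (L : List (Option Int)) : Int × List (Option Int) :=
  if pvCand A i = [] then (1, L)
  else
    match L.getD i none with
    | some v => (v, L)
    | none =>
      let r := (pvCand A i).attach.foldl
        (fun (acc : List Int × List (Option Int)) j =>
          let p := pvGetLi A j.1 acc.2
          (acc.1 ++ [p.1], p.2)) ([], L)
      let m : Int := 1 + (PySem.List.max? r.1 (fun y => y)).getD 0
      (m, r.2.set i (some m))
termination_by i
decreasing_by
  have := j.2
  simp only [pvCand, List.mem_filter, List.mem_range] at this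
  exact this.1

-- return get_L_i(len(A)-1).  For A = [] Python calls get_L_i(-1), where range(-1) = [] and the
-- function returns 1 before A[-1] is ever evaluated; Nat subtraction gives i = 0 with range 0 = [],
-- the same value, so the Nat index is value-exact on every input.
def get_len_of_longest_nondecreasing_subseq (A : List Int) : Int :=
  (pvGetLi A (A.length - 1) (List.replicate A.length (none : Option Int))).1

-- ===== PORT B =====
-- inner loop: best = max length among processed pairs whose value is ≤ x
def pvBest (x : Int) (dp : List (Int × Int)) : Int :=
  dp.foldl (fun b p => if p.1 ≤ x ∧ b < p.2 then p.2 else b) 0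

-- for x in A: dp.append((x, best + 1))
def pvDpB (A : List Int) : List (Int × Int) :=
  A.foldl (fun dp x => dp ++ [(x, pvBest x dp + 1)]) []

def get_len_of_longest_nondecreasing_subseq_alt (A : List Int) : Int :=
  if A = [] then 0
  else ((PySem.List.pyGet? (pvDpB A) (-1)).getD (0, 0)).2  -- dp[-1][1]; dp nonempty here

-- ===== PRECONDITION & SPEC =====
-- On the empty list A returns 1 (its recursion bottoms out before any element is read), which is
-- not the length of any subsequence of []; B returns the intended 0.
def D_get_len_of_longest_nondecreasing_subseq (A : List Int) : Prop := A = []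
instance (A : List Int) : Decidable (D_get_len_of_longest_nondecreasing_subseq A) := by
  unfold D_get_len_of_longest_nondecreasing_subseq; infer_instance

def Spec_get_len_of_longest_nondecreasing_subseq (A : List Int) (out : Int) : Prop :=
  ¬ D_get_len_of_longest_nondecreasing_subseq A → out = get_len_of_longest_nondecreasing_subseq_alt A
instance (A : List Int) (out : Int) : Decidable (Spec_get_len_of_longest_nondecreasing_subseq A out) := by
  unfold Spec_get_len_of_longest_nondecreasing_subseq; infer_instance

def pvDiffWitness_get_len_of_longest_nondecreasing_subseq : List Int := []
def pvDiffWitnessOut_get_len_of_longest_nondecreasing_subseq : Int × Int := (1, 0)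

-- ===== CLAIM (what is proved, stated in full; the proofs are below) =====
def Claim_unchanged_get_len_of_longest_nondecreasing_subseq : Prop := ∀ (A : List Int), Dom_get_len_of_longest_nondecreasing_subseq A → Spec_get_len_of_longest_nondecreasing_subseq A (get_len_of_longest_nondecreasing_subseq A)
def Claim_changed_get_len_of_longest_nondecreasing_subseq : Prop := Dom_get_len_of_longest_nondecreasing_subseq (pvDiffWitness_get_len_of_longest_nondecreasing_subseq) ∧ D_get_len_of_longest_nondecreasing_subseq (pvDiffWitness_get_len_of_longest_nondecreasing_subseq) ∧ get_len_of_longest_nondecreasing_subseq (pvDiffWitness_get_len_of_longest_nondecreasing_subseq) = pvDiffWitnessOut_get_len_of_longest_nondecreasing_subseq.1 ∧ get_len_of_longest_nondecreasing_subseq_alt (pvDiffWitness_get_len_of_longest_nondecreasing_subseq) = pvDiffWitnessOut_get_len_of_longest_nondecreasing_subseq.2 ∧ pvDiffWitnessOut_get_len_of_longest_nondecreasing_subseq.1 ≠ pvDiffWitnessOut_get_len_of_longest_nondecreasing_subseq.2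
def Claim_exact_get_len_of_longest_nondecreasing_subseq : Prop := ∀ (A : List Int), Dom_get_len_of_longest_nondecreasing_subseq A → D_get_len_of_longest_nondecreasing_subseq A → get_len_of_longest_nondecreasing_subseq A ≠ get_len_of_longest_nondecreasing_subseq_alt A

-- ===== LEMMAS AND PROOFS =====

-- canonical value: L(i) = 1 + max({L(j) : j < i, A[j] ≤ A[i]} ∪ {0})
def Lspec (A : List Int) (i : Nat) : Int :=
  1 + ((pvCand A i).attach.map (fun j => Lspec A j.1)).foldl max 0
termination_by i
decreasing_by
  have := j.2
  simp only [pvCand, List.mem_filter, List.mem_range] at this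
  exact this.1

lemma attach_map_fst {α β : Type} (l : List α) (f : α → β) :
    l.attach.map (fun j => f j.1) = l.map f := by
  simp

lemma le_foldl_max_int (l : List Int) (b : Int) : b ≤ l.foldl max b := by
  induction l generalizing b with
  | nil => simp
  | cons a t ih => exact le_trans (le_max_left b a) (ih (max b a))

lemma Lspec_pos (A : List Int) (i : Nat) : 1 ≤ Lspec A i := by
  rw [Lspec]
  have := le_foldl_max_int (((pvCand A i).attach.map (fun j => Lspec A j.1))) 0
  omega

lemma Lspec_eq (A : List Int) (i : Nat) :
    Lspec A i = 1 + ((pvCand A i).map (Lspec A)).foldl max 0 := by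
  rw [Lspec, attach_map_fst]

def MemoInv (A : List Int) (L : List (Option Int)) : Prop :=
  ∀ k v, L.getD k none = some v → v = Lspec A k

lemma memoInv_set (A : List Int) (L : List (Option Int)) (i : Nat) (m : Int)
    (h : MemoInv A L) (hv : Lspec A i = m) : MemoInv A (L.set i (some m)) := by
  intro k v hk
  rw [List.getD_eq_getElem?_getD, List.getElem?_set] at hk
  split_ifs at hk with h1 h2
  · simp only [Option.getD_some] at hk
    obtain rfl : m = v := by injection hk
    rw [← h1, ← hv]
  · simp at hk
  · exact h k v (by rw [List.getD_eq_getElem?_getD]; exact hk)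

lemma getLi_spec (A : List Int) (i : Nat) :
    ∀ (L : List (Option Int)), MemoInv A L →
      (pvGetLi A i L).1 = Lspec A i ∧ MemoInv A (pvGetLi A i L).2 := by
  induction i using Nat.strong_induction_on with
  | _ i IH =>
    intro L hL
    rw [pvGetLi]
    by_cases hc : pvCand A i = []
    · simp only [hc]
      constructor
      · rw [Lspec_eq, hc]; simp
      · simpa using hL
    · simp only [hc]
      cases hmem : L.getD i none with
      | some v =>
        simp only []
        exact ⟨hL i v hmem, hL⟩
      | none =>
        simp only []
        -- the fold computing the recursive values
        have fold_spec : ∀ (js : List {x // x ∈ pvCand A i}) (acc : List Int)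
            (L' : List (Option Int)), MemoInv A L' →
            (js.foldl (fun (acc : List Int × List (Option Int)) j =>
               let p := pvGetLi A j.1 acc.2
               (acc.1 ++ [p.1], p.2)) (acc, L')).1
              = acc ++ js.map (fun j => Lspec A j.1) ∧
            MemoInv A (js.foldl (fun (acc : List Int × List (Option Int)) j =>
               let p := pvGetLi A j.1 acc.2
               (acc.1 ++ [p.1], p.2)) (acc, L')).2 := by
          intro js
          induction js with
          | nil => intro acc L' h'; simp [h']
          | cons j t iht =>
            intro acc L' h'
            have hj : j.1 < i := by
              have := j.2
              simp only [pvCand, List.mem_filter, List.mem_range] at this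
              exact this.1
            have hstep := IH j.1 hj L' h'
            simp only [List.foldl_cons]
            have := iht (acc ++ [(pvGetLi A j.1 L').1]) (pvGetLi A j.1 L').2 hstep.2
            rw [this.1]
            refine ⟨?_, this.2⟩
            rw [hstep.1]
            simp
        have hfold := fold_spec (pvCand A i).attach [] L hL
        rw [hfold.1]
        simp only [List.nil_append, attach_map_fst]
        -- vals = (pvCand A i).map (Lspec A) is nonempty; its Python max
        obtain ⟨c, cs, hcc⟩ := List.exists_cons_of_ne_nil hc
        have hvals : (pvCand A i).map (Lspec A) = Lspec A c :: cs.map (Lspec A) := by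
          rw [hcc]; rfl
        have hmax : (PySem.List.max? ((pvCand A i).map (Lspec A)) (fun y => y)).getD 0
            = (cs.map (Lspec A)).foldl max (Lspec A c) := by
          rw [hvals, PySem.List.max?_id_cons]; rfl
        have hm : 1 + (PySem.List.max? ((pvCand A i).map (Lspec A)) (fun y => y)).getD 0
            = Lspec A i := by
          rw [hmax, Lspec_eq A i, hvals]
          simp only [List.foldl_cons]
          rw [max_eq_right (le_of_lt (lt_of_lt_of_le Int.zero_lt_one (Lspec_pos A c)))]
        exact ⟨hm, memoInv_set A _ i _ hfold.2 hm.symm⟩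

lemma memoInv_replicate (A : List Int) (n : Nat) :
    MemoInv A (List.replicate n (none : Option Int)) := by
  intro k v hk
  rw [List.getD_eq_getElem?_getD, List.getElem?_replicate] at hk
  by_cases h : k < n <;> simp [h] at hk

-- the port of A on the empty list (its WF recursion is opaque to `decide`)
lemma portA_nil : get_len_of_longest_nondecreasing_subseq [] = 1 := by
  unfold get_len_of_longest_nondecreasing_subseq
  rw [pvGetLi]
  norm_num [pvCand]

lemma portA_eq_Lspec (A : List Int) :
    get_len_of_longest_nondecreasing_subseq A = Lspec A (A.length - 1) := by
  unfold get_len_of_longest_nondecreasing_subseq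
  exact (getLi_spec A (A.length - 1) _ (memoInv_replicate A A.length)).1

-- ===== B side =====

lemma best_eq (A : List Int) (x : Int) (js : List Nat) : ∀ (b : Int),
    (js.map (fun j => (A.getD j 0, Lspec A j))).foldl
        (fun b p => if p.1 ≤ x ∧ b < p.2 then p.2 else b) b
      = ((js.filter (fun j => A.getD j 0 ≤ x)).map (Lspec A)).foldl max b := by
  induction js with
  | nil => intro b; rfl
  | cons j t ih =>
    intro b
    by_cases hc : A.getD j 0 ≤ x
    · simp only [List.map_cons, List.foldl_cons, List.filter_cons, hc, decide_true,
        if_true, true_and]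
      have : (if b < Lspec A j then Lspec A j else b) = max b (Lspec A j) := by
        by_cases h : b < Lspec A j
        · rw [if_pos h, max_eq_right (le_of_lt h)]
        · rw [if_neg h, max_eq_left (by omega)]
      rw [this, ih]
    · simp only [List.map_cons, List.foldl_cons, List.filter_cons, hc, decide_false,
        if_false, false_and, Bool.false_eq_true]
      rw [ih]

lemma dp_spec (A : List Int) : ∀ (k : Nat), k ≤ A.length →
    (A.take k).foldl (fun dp x => dp ++ [(x, pvBest x dp + 1)]) []
      = (List.range k).map (fun j => (A.getD j 0, Lspec A j)) := by
  intro k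
  induction k with
  | zero => intro _; simp
  | succ k ih =>
    intro hk
    have hklt : k < A.length := by omega
    have htake : A.take (k + 1) = A.take k ++ [A.getD k 0] := by
      rw [List.take_add_one]
      congr 1
      rw [List.getD_eq_getElem?_getD, List.getElem?_eq_getElem hklt]
      rfl
    rw [htake, List.foldl_append, ih (by omega)]
    simp only [List.foldl_cons, List.foldl_nil]
    rw [List.range_succ, List.map_append]
    congr 1
    simp only [List.map_cons, List.map_nil]
    congr 2
    -- best + 1 = Lspec A k
    unfold pvBest
    rw [best_eq A (A.getD k 0) (List.range k) 0]
    have : (List.range k).filter (fun j => A.getD j 0 ≤ A.getD k 0) = pvCand A k := rfl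
    rw [this, Lspec_eq]
    omega

lemma portB_eq_Lspec (A : List Int) (h : A ≠ []) :
    get_len_of_longest_nondecreasing_subseq_alt A = Lspec A (A.length - 1) := by
  unfold get_len_of_longest_nondecreasing_subseq_alt
  rw [if_neg h]
  have hlen : 0 < A.length := List.length_pos_of_ne_nil h
  have hdp : pvDpB A = (List.range A.length).map (fun j => (A.getD j 0, Lspec A j)) := by
    unfold pvDpB
    have := dp_spec A A.length (le_refl _)
    rwa [List.take_length] at this
  rw [hdp, PySem.List.pyGet?_neg_one]
  have hlast : ((List.range A.length).map (fun j => (A.getD j 0, Lspec A j))).getLast?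
      = some (A.getD (A.length - 1) 0, Lspec A (A.length - 1)) := by
    rw [List.getLast?_eq_getElem?]
    simp only [List.length_map, List.length_range]
    rw [List.getElem?_map, List.getElem?_range (by omega)]
    rfl
  rw [hlast]
  rfl

-- ===== VERDICT (by name: the statement is the Claim_ definition above) =====
theorem get_len_of_longest_nondecreasing_subseq_spec : Claim_unchanged_get_len_of_longest_nondecreasing_subseq := by
  intro A _ hD
  rw [portA_eq_Lspec, portB_eq_Lspec A hD]

theorem get_len_of_longest_nondecreasing_subseq_changed : Claim_changed_get_len_of_longest_nondecreasing_subseq := by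
  unfold Claim_changed_get_len_of_longest_nondecreasing_subseq
  exact ⟨by decide, rfl, portA_nil, by decide, by decide⟩

theorem get_len_of_longest_nondecreasing_subseq_tight : Claim_exact_get_len_of_longest_nondecreasing_subseq := by
  intro A _ hD
  subst hD
  rw [portA_nil]
  decide
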